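-- pv_equiv track=rewrite | github.com/IES-Rafael-Alberti/1dawb-ejercicios-u2-nromragm | src/ej22_20.py | encontrar_letra
-- ===== SOURCE A (Python) =====
-- def encontrar_letra(frase, letra):
--     resultado = ""
--     for i in range(0, len(frase)):
--         if frase[i] == letra:
--             resultado += f"La letra esta en la posicion {i}"
--             break
--         else:
--             resultado += f"No esta la letra en la posicion {i}\n"
--
--     return resultado
-- ===== SOURCE B (Python) =====
-- def encontrar_letra(frase, letra):
--     pos = None
--     for i, ch in enumerate(frase):
--         if ch == letra:
--             pos = i
--             break
--     n = pos if pos is not None else len(frase)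
--     lines = ''.join(f"No esta la letra en la posicion {i}\n" for i in range(n))
--     if pos is not None:
--         lines += f"La letra esta en la posicion {pos}"
--     return lines
-- ===== Notes on version B (the rewrite author's own statement) =====
-- stated objective: simpler
-- what changed: Splits A's single interleaved loop (accumulating message lines while searching) into two separate passes: a locate pass that finds the first matching index, then a render pass that builds all 'No esta' lines from a range and appends the found line if any.
import Mathlib
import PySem

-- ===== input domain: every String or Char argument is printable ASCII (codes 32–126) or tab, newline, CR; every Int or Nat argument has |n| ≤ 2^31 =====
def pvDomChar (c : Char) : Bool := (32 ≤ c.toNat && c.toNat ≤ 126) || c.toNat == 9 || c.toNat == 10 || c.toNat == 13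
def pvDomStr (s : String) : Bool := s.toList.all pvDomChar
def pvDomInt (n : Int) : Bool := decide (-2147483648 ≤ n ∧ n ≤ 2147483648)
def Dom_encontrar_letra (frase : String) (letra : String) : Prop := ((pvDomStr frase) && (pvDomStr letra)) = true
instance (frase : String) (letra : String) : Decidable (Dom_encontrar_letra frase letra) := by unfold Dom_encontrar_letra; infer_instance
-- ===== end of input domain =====

-- B replaces A's single interleaved search-and-accumulate loop by a locate pass followed by a render pass (simpler decomposition; return value only).

-- ===== PORT A =====
-- A's loop: for i in range(len(frase)), accumulate a line per non-match, stop at first match.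
def encontrarA (letra : String) : List Char → Nat → String → String
  | [], _, acc => acc
  | c :: rest, i, acc =>
    if String.ofList [c] = letra then
      acc ++ ("La letra esta en la posicion " ++ toString i)
    else
      encontrarA letra rest (i + 1) (acc ++ ("No esta la letra en la posicion " ++ toString i ++ "\n"))

def encontrar_letra (frase : String) (letra : String) : String :=
  encontrarA letra frase.toList 0 ""

-- ===== PORT B =====
-- locate pass: first index i with frase[i] == letra (single-char equality), or none
def locateB (letra : String) : List Char → Nat → Option Nat
  | [], _ => none
  | c :: rest, i => if String.ofList [c] = letra then some i else locateB letra rest (i + 1)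

-- ''.join, ported step for step
def joinB : List String → String
  | [] => ""
  | s :: rest => s ++ joinB rest

def encontrar_letra_alt (frase : String) (letra : String) : String :=
  let pos := locateB letra frase.toList 0
  let n := match pos with | some p => p | none => frase.toList.length
  let lines := joinB ((List.range n).map
    (fun i => "No esta la letra en la posicion " ++ toString i ++ "\n"))
  match pos with
  | some p => lines ++ ("La letra esta en la posicion " ++ toString p)
  | none => lines

-- ===== PRECONDITION & SPEC =====
def Spec_encontrar_letra (frase : String) (letra : String) (out : String) : Prop := out = encontrar_letra_alt frase letra
instance (frase : String) (letra : String) (out : String) : Decidable (Spec_encontrar_letra frase letra out) := by unfold Spec_encontrar_letra; infer_instance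

-- ===== CLAIM (what is proved, stated in full; the proofs are below) =====
def Claim_equal_encontrar_letra : Prop := ∀ (frase : String) (letra : String), Dom_encontrar_letra frase letra → Spec_encontrar_letra frase letra (encontrar_letra frase letra)

-- ===== LEMMAS AND PROOFS =====

theorem str_append_assoc (a b c : String) : (a ++ b) ++ c = a ++ (b ++ c) := by
  apply String.ext
  simp

theorem locateB_ge (letra : String) :
    ∀ (cs : List Char) (i p : Nat), locateB letra cs i = some p → i ≤ p := by
  intro cs
  induction cs with
  | nil => intro i p h; simp [locateB] at h
  | cons c rest ih =>
    intro i p h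
    simp only [locateB] at h
    split at h
    · exact le_of_eq (Option.some.inj h)
    · have := ih (i + 1) p h; omega

theorem encontrarA_eq (letra : String) :
    ∀ (cs : List Char) (i : Nat) (acc : String),
      encontrarA letra cs i acc =
        match locateB letra cs i with
        | some p => acc ++ joinB ((List.range' i (p - i)).map
            (fun j => "No esta la letra en la posicion " ++ toString j ++ "\n")) ++
            ("La letra esta en la posicion " ++ toString p)
        | none => acc ++ joinB ((List.range' i cs.length).map
            (fun j => "No esta la letra en la posicion " ++ toString j ++ "\n")) := by
  intro cs
  induction cs with
  | nil => intro i acc; simp [encontrarA, locateB, joinB]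
  | cons c rest ih =>
    intro i acc
    simp only [encontrarA, locateB]
    split
    · simp [joinB]
    · rw [ih]
      cases h : locateB letra rest (i + 1) with
      | some p =>
        have hip : i + 1 ≤ p := locateB_ge letra rest (i + 1) p h
        have hr : p - i = (p - (i + 1)) + 1 := by omega
        simp only [hr, List.range'_succ, List.map_cons, joinB]
        simp [str_append_assoc]
      | none =>
        simp only [List.length_cons, List.range'_succ, List.map_cons, joinB]
        simp [str_append_assoc]

-- ===== VERDICT (by name: the statement is the Claim_ definition above) =====
theorem encontrar_letra_spec : Claim_equal_encontrar_letra := by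
  intro frase letra _
  show encontrar_letra frase letra = encontrar_letra_alt frase letra
  unfold encontrar_letra encontrar_letra_alt
  rw [encontrarA_eq]
  cases h : locateB letra frase.toList 0 with
  | some p => simp [List.range_eq_range']
  | none => simp [List.range_eq_range']
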